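-- pv_equiv track=rewrite | github.com/cujomalainey/dev | contrib/syzbot-autotriager/utils.py | interesting_keyword_in
-- ===== SOURCE A (Python) =====
-- def interesting_keyword_in(body):
--     """Returns true if a keyword is present in |body|"""
--     keywords = ['overflow', 'oob', 'uaf', 'use after free',
--                 'use-after-free', 'kasan', 'kmsan', 'syzkaller',
--                 'reported-by: syzbot',
--                 ]
--     for keyword in keywords:
--         if keyword in body.lower():
--             return True
--     return False
-- ===== SOURCE B (Python) =====
-- def interesting_keyword_in(body):
--     """Returns true if a keyword is present in |body|"""
--     keywords = ['overflow', 'oob', 'uaf', 'use after free',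
--                 'use-after-free', 'kasan', 'kmsan', 'syzkaller',
--                 'reported-by: syzbot',
--                 ]
--     b = body.lower()
--     return any(b.startswith(kw, i)
--                for i in range(len(b) + 1)
--                for kw in keywords)
-- ===== Notes on version B (the rewrite author's own statement) =====
-- stated objective: alternative
-- what changed: Replaces A's keyword-major loop (a separate substring scan of body.lower() per keyword) by a single position-major scan: for each start position in body.lower(), test whether some keyword is a prefix there.
import Mathlib
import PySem

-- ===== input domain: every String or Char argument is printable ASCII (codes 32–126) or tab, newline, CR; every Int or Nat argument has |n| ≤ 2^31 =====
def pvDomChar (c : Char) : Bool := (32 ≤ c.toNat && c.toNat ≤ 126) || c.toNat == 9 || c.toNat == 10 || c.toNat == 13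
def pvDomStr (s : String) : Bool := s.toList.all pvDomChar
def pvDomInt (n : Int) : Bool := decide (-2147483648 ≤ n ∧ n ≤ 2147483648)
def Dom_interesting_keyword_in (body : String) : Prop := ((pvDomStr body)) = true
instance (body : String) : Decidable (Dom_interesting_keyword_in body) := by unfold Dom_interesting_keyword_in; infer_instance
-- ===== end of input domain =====

-- B replaces A's per-keyword substring scans of body.lower() by one left-to-right scan over
-- start positions, testing at each position whether some keyword is a prefix (objective: alternative).

def pvKeywords : List String :=
  ["overflow", "oob", "uaf", "use after free",
   "use-after-free", "kasan", "kmsan", "syzkaller",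
   "reported-by: syzbot"]

-- ===== PORT A =====
-- for keyword in keywords: if keyword in body.lower(): return True / return False
def interesting_keyword_in (body : String) : Bool :=
  pvKeywords.any (fun kw => PySem.Chars.isIn kw.toList (PySem.Chars.lower body.toList))

-- ===== PORT B =====
-- b = body.lower(); any(b.startswith(kw, i) for i in range(len(b)+1) for kw in keywords)
-- b.startswith(kw, i) with 0 ≤ i is exactly PySem.Chars.startswith (b.drop i) kw
def interesting_keyword_in_alt (body : String) : Bool :=
  let b := PySem.Chars.lower body.toList
  (List.range (b.length + 1)).any (fun i =>
    pvKeywords.any (fun kw => PySem.Chars.startswith (b.drop i) kw.toList))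

-- ===== PRECONDITION & SPEC =====
def Spec_interesting_keyword_in (body : String) (out : Bool) : Prop := out = interesting_keyword_in_alt body
instance (body : String) (out : Bool) : Decidable (Spec_interesting_keyword_in body out) := by unfold Spec_interesting_keyword_in; infer_instance

-- ===== CLAIM (what is proved, stated in full; the proofs are below) =====
def Claim_equal_interesting_keyword_in : Prop := ∀ (body : String), Dom_interesting_keyword_in body → Spec_interesting_keyword_in body (interesting_keyword_in body)

-- ===== LEMMAS AND PROOFS =====

-- keyword-major substring search ≡ position-major prefix search, for any keyword list and haystack
theorem pv_any_isIn_eq_any_startswith (kws : List String) (s : List Char) :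
    kws.any (fun kw => PySem.Chars.isIn kw.toList s) =
    (List.range (s.length + 1)).any (fun i =>
      kws.any (fun kw => PySem.Chars.startswith (s.drop i) kw.toList)) := by
  rw [Bool.eq_iff_iff]
  simp only [List.any_eq_true, List.mem_range, PySem.Chars.startswith_iff]
  constructor
  · rintro ⟨kw, hkw, hin⟩
    rw [PySem.Chars.isIn_iff_infix kw.toList s] at hin
    obtain ⟨j, hj⟩ := (PySem.Chars.exists_prefix_drop_iff_isIn kw.toList s).2
      ((PySem.Chars.isIn_iff_infix kw.toList s).mpr hin)
    by_cases h : j ≤ s.length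
    · exact ⟨j, by omega, kw, hkw, hj⟩
    · have : s.drop j = [] := List.drop_eq_nil_of_le (by omega)
      rw [this] at hj
      have : kw.toList = [] := List.prefix_nil.mp hj
      exact ⟨0, by omega, kw, hkw, by simp [this]⟩
  · rintro ⟨i, _, kw, hkw, hpre⟩
    refine ⟨kw, hkw, ?_⟩
    exact (PySem.Chars.exists_prefix_drop_iff_isIn kw.toList s).1 ⟨i, hpre⟩

-- ===== VERDICT (by name: the statement is the Claim_ definition above) =====
theorem interesting_keyword_in_spec : Claim_equal_interesting_keyword_in := by
  intro body _
  unfold Spec_interesting_keyword_in interesting_keyword_in interesting_keyword_in_alt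
  exact pv_any_isIn_eq_any_startswith pvKeywords (PySem.Chars.lower body.toList)
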